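-- pv_equiv track=rewrite | github.com/mie-lab/geospatial_optimal_transport | spatiotemporal/utils.py | get_children_hierarchy
-- ===== SOURCE A (Python) =====
-- def get_children_hierarchy(group, hier, levels_down):
--     # wrapper function to avoid passing hier through all recursions
--     def get_children(group, levels_down):
--         if "Group" not in group or levels_down == 0:
--             return [group]
--         else:
--             children_list = []
--             for child in hier[group]:
--                 children_list.extend(get_children(child, levels_down - 1))
--             return children_list
--
--     return get_children(group, levels_down)
-- ===== SOURCE B (Python) =====
-- def get_children_hierarchy(group, hier, levels_down):
--     # iterative version: explicit stack of (node, remaining levels) instead of recursion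
--     result = []
--     stack = [(group, levels_down)]
--     while stack:
--         node, remaining = stack.pop()
--         if "Group" not in node or remaining == 0:
--             result.append(node)
--         else:
--             # reversed so the LIFO stack reproduces left-to-right order
--             stack.extend((child, remaining - 1) for child in reversed(hier[node]))
--     return result
-- ===== Notes on version B (the rewrite author's own statement) =====
-- stated objective: alternative
-- what changed: Replaced the nested recursive helper with an iterative explicit stack of (node, remaining-levels) pairs (children pushed in reverse to keep the left-to-right order), appending leaves to one result list instead of concatenating recursive results.
-- outside the precondition, e.g. on get_children_hierarchy('GroupA', {'GroupA': ['GroupA']}, 950): A returns ['GroupA'], B returns ['GroupA']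
import Mathlib
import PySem

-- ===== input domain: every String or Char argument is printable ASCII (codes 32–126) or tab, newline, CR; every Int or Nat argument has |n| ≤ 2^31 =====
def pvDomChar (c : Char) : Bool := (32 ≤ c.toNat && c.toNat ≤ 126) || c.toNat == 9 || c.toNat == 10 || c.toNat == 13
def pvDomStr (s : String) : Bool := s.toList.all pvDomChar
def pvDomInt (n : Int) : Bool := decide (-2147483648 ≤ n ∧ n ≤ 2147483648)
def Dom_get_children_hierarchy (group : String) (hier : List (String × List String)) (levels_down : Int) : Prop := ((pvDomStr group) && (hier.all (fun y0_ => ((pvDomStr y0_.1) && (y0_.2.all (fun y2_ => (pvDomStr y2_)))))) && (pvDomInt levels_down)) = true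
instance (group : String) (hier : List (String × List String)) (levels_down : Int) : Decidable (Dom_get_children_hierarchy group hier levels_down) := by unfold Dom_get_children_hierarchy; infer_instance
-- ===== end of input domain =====

-- B replaces A's nested recursion by an explicit stack loop (children pushed in reverse order);
-- same cost, different decomposition ("alternative").


-- ===== PORT A =====
-- A's inner recursion 'get_children(group, levels_down)', made structural with a fuel argument.
-- Inside Pre_ the recursion depth is bounded by levels_down (positive case) resp. by the size of
-- the acyclic reachable key set (≤ hier.length), so fuel = levels_down.toNat + hier.length + 1 is
-- never exhausted on Pre_ inputs and the fuel-0 fallback '[]' is never the returned value.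
-- 'hier[group]' on a missing key is a Python KeyError (excluded by Pre_); the port uses getD [].
def pvGoA (hier : PySem.Dict String (List String)) : Nat → String → Int → List String
  | 0, g, ld =>
      if PySem.Str.isIn "Group" g = false ∨ ld = 0 then [g] else []
  | f + 1, g, ld =>
      if PySem.Str.isIn "Group" g = false ∨ ld = 0 then [g]
      else (hier.getD g []).foldl (fun acc c => acc ++ pvGoA hier f c (ld - 1)) []

def get_children_hierarchy (group : String) (hier : List (String × List String)) (levels_down : Int) : List String :=
  pvGoA (PySem.Dict.ofList hier) (levels_down.toNat + hier.length + 1) group levels_down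

-- ===== PORT B =====
-- Termination measure for the stack loop: weight of a node = size of its expansion tree, by fuel.
def pvWeight (hier : PySem.Dict String (List String)) : Nat → String → Nat
  | 0, _ => 1
  | n + 1, g => 1 + ((hier.getD g []).map (pvWeight hier n)).sum

-- Source B's while-loop.  The Lean list's HEAD is the TOP of the Python stack (Python pops from the
-- end and pushes the children reversed; popping the head and prepending the children in order is
-- the same discipline).  Each stack entry carries the same fuel that makes port A structural; the
-- fuel-0 branch (drop the entry) is a totality guard never reached on Pre_ inputs.
def pvLoopB (hier : PySem.Dict String (List String)) : List (String × Int × Nat) → List String → List String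
  | [], res => res
  | (g, ld, 0) :: rest, res =>
      if PySem.Str.isIn "Group" g = false ∨ ld = 0 then
        pvLoopB hier rest (res ++ [g])
      else
        pvLoopB hier rest res
  | (g, ld, f' + 1) :: rest, res =>
      if PySem.Str.isIn "Group" g = false ∨ ld = 0 then
        pvLoopB hier rest (res ++ [g])
      else
        pvLoopB hier (((hier.getD g []).map (fun c => (c, ld - 1, f'))) ++ rest) res
  termination_by stack _ => (stack.map (fun p => pvWeight hier p.2.2 p.1)).sum
  decreasing_by
    · simp [pvWeight]
    · simp [pvWeight]
    · have h1 : 0 < pvWeight hier (f' + 1) g := by simp [pvWeight]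
      simp; omega
    · rw [List.map_append, List.sum_append, List.map_cons, List.sum_cons, List.map_map]
      have hc : (List.map ((fun p => pvWeight hier p.2.2 p.1) ∘ fun c => (c, ld - 1, f')) (hier.getD g []))
          = List.map (pvWeight hier f') (hier.getD g []) := by
        simp [Function.comp]
      rw [hc]
      simp only [pvWeight]
      omega

def get_children_hierarchy_alt (group : String) (hier : List (String × List String)) (levels_down : Int) : List String :=
  pvLoopB (PySem.Dict.ofList hier) [(group, levels_down, levels_down.toNat + hier.length + 1)] []

-- ===== PRECONDITION & SPEC =====
-- Helpers for Pre_: the traversal graph.  A node g is expandable iff "Group" in g; its graph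
-- successors are the "Group"-containing entries of hier[g] (missing key → no successors; such a
-- node fails the key condition below anyway).
def pvChildrenG (d : PySem.Dict String (List String)) (g : String) : List String :=
  if PySem.Str.isIn "Group" g then (d.getD g []).filter (fun c => PySem.Str.isIn "Group" c) else []

-- BFS layers with a visited list: pvReachSet d n frontier visited = visited plus every node
-- reachable from the frontier in ≤ n steps (new nodes recorded in BFS order).
def pvReachSet (d : PySem.Dict String (List String)) : Nat → List String → List String → List String
  | 0, _, vis => vis
  | n + 1, frontier, vis =>
      match ((frontier.flatMap (pvChildrenG d)).filter (fun c => ¬ vis.contains c)).dedup with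
      | [] => vis
      | nxt@(_ :: _) => pvReachSet d n nxt (vis ++ nxt)

-- Kahn-style peeling: repeatedly delete nodes with no successor inside the set; the set is
-- acyclic iff everything peels away.
def pvPeel (d : PySem.Dict String (List String)) : Nat → List String → List String
  | 0, s => s
  | n + 1, s =>
      match s.filter (fun g => (pvChildrenG d g).all (fun c => ¬ s.contains c)) with
      | [] => s
      | rem@(_ :: _) => pvPeel d n (s.filter (fun g => ¬ rem.contains g))

def pvFullReach (group : String) (hier : List (String × List String)) : List String :=
  pvReachSet (PySem.Dict.ofList hier) (hier.length + (hier.flatMap Prod.snd).length + 1) [group] [group]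

-- Pre_ excludes exactly the inputs on which the Python A does not return a value: a KeyError
-- (some expanded "Group"-node is not a key of hier) or a RecursionError (a reachable cycle, or a
-- recursion deeper than Python's recursion limit — hence the 900 safety margin on levels_down for
-- the depth-bounded clause; deeper recursions are still admitted through the acyclic clause).
def Pre_get_children_hierarchy (group : String) (hier : List (String × List String)) (levels_down : Int) : Prop :=
  PySem.Str.isIn "Group" group = false ∨ levels_down = 0 ∨
  (0 < levels_down ∧ levels_down ≤ 900 ∧
    ∀ g ∈ pvReachSet (PySem.Dict.ofList hier) (levels_down.toNat - 1) [group] [group],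
      (PySem.Dict.ofList hier).contains g = true) ∨
  ((∀ g ∈ pvFullReach group hier, (PySem.Dict.ofList hier).contains g = true) ∧
    pvPeel (PySem.Dict.ofList hier) (pvFullReach group hier).length (pvFullReach group hier) = [])
instance (group : String) (hier : List (String × List String)) (levels_down : Int) : Decidable (Pre_get_children_hierarchy group hier levels_down) := by unfold Pre_get_children_hierarchy; infer_instance

def pvWitness_get_children_hierarchy : String × (List (String × List String)) × Int :=
  ("GroupA", [("GroupA", ["a", "b"])], 1)

def Spec_get_children_hierarchy (group : String) (hier : List (String × List String)) (levels_down : Int) (out : List String) : Prop := out = get_children_hierarchy_alt group hier levels_down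
instance (group : String) (hier : List (String × List String)) (levels_down : Int) (out : List String) : Decidable (Spec_get_children_hierarchy group hier levels_down out) := by unfold Spec_get_children_hierarchy; infer_instance

-- ===== CLAIM (what is proved, stated in full; the proofs are below) =====
def Claim_equal_get_children_hierarchy : Prop := ∀ (group : String) (hier : List (String × List String)) (levels_down : Int), Dom_get_children_hierarchy group hier levels_down → Pre_get_children_hierarchy group hier levels_down → Spec_get_children_hierarchy group hier levels_down (get_children_hierarchy group hier levels_down)

-- ===== LEMMAS AND PROOFS =====
theorem pvGoA_base (hier : PySem.Dict String (List String)) (f : Nat) (g : String) (ld : Int)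
    (h : PySem.Str.isIn "Group" g = false ∨ ld = 0) : pvGoA hier f g ld = [g] := by
  cases f <;> simp only [pvGoA] <;> rw [if_pos h]

-- the loop invariant: the stack loop emits, left to right, exactly port A's result (at the
-- entry's own fuel) for each stack entry
theorem pvLoopB_eq (hier : PySem.Dict String (List String)) (stack : List (String × Int × Nat)) (res : List String) :
    pvLoopB hier stack res = res ++ stack.flatMap (fun p => pvGoA hier p.2.2 p.1 p.2.1) := by
  induction stack, res using pvLoopB.induct hier with
  | case1 res => simp [pvLoopB]
  | case2 g ld rest res h ih =>
      rw [pvLoopB, if_pos h, ih]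
      simp [pvGoA_base hier _ _ _ h]
  | case3 g ld rest res h ih =>
      rw [pvLoopB, if_neg h, ih]
      have : pvGoA hier 0 g ld = [] := by
        simp only [pvGoA, if_neg h]
      simp [this]
  | case4 g ld f' rest res h ih =>
      rw [pvLoopB, if_pos h, ih]
      simp [pvGoA_base hier _ _ _ h]
  | case5 g ld f' rest res h ih =>
      rw [pvLoopB, if_neg h, ih]
      have hA : pvGoA hier (f' + 1) g ld
          = (hier.getD g []).flatMap (fun c => pvGoA hier f' c (ld - 1)) := by
        simp only [pvGoA, if_neg h]
        rw [PySem.List.foldl_append_eq_flatMap]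
        simp
      simp [hA, List.flatMap_append, List.flatMap_map]

-- ===== VERDICT (by name: the statement is the Claim_ definition above) =====
theorem get_children_hierarchy_spec : Claim_equal_get_children_hierarchy := by
  intro group hier levels_down _ _
  unfold Spec_get_children_hierarchy get_children_hierarchy get_children_hierarchy_alt
  rw [pvLoopB_eq]
  simp
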